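-- pv_equiv track=rewrite | github.com/Aleshka5/video_hosting_website | video_backend/app.py | simple_summarization
-- ===== SOURCE A (Python) =====
-- import operator
--
-- def simple_summarization(image_to_text_list):
--     best_image_to_texts = []
--     for image_to_text_for_scene in image_to_text_list:
--         best_text = ''
--         dict_for_scene = {}
--         for image_to_text in image_to_text_for_scene:
--             text = image_to_text['text']
--             if text in dict_for_scene:
--                 dict_for_scene[text] += 1
--             else:
--                 dict_for_scene[text] = 1
--         max_key = max(dict_for_scene.items(), key=operator.itemgetter(1))[0]
--         for image_to_text in image_to_text_for_scene:
--             if image_to_text['text'] == max_key: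
--                 best_image_to_texts.append(image_to_text)
--                 break
--
--     return best_image_to_texts
-- ===== SOURCE B (Python) =====
-- def simple_summarization(image_to_text_list):
--     best_image_to_texts = []
--     for scene in image_to_text_list:
--         stats = {}
--         for image_to_text in scene:
--             text = image_to_text['text']
--             count, first = stats.get(text, (0, image_to_text))
--             stats[text] = (count + 1, first)
--         best_image_to_texts.append(max(stats.values(), key=lambda v: v[0])[1])
--     return best_image_to_texts
-- ===== Notes on version B (the rewrite author's own statement) =====
-- stated objective: alternative
-- what changed: A counts texts per scene and then re-scans the scene for the first item with the winning text; B keeps (count, first item) per text in one dict built in a single pass and picks the winner directly from the dict values, removing the second scan.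
import Mathlib
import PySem

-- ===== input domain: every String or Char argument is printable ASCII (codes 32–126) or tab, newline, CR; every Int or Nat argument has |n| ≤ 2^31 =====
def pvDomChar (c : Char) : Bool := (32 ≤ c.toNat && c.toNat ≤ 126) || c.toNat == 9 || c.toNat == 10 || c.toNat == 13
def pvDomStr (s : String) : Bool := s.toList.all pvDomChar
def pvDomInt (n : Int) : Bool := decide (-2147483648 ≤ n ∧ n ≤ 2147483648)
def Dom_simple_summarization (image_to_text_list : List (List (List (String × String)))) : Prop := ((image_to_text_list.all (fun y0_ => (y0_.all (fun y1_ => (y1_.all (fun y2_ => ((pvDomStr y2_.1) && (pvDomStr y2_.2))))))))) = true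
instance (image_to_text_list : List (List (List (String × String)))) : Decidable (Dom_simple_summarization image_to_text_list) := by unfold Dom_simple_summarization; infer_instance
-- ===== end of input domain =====

-- B replaces A's separate second scan of each scene by a dict storing (count, first item) per text,
-- built in one pass; the winner is the first maximum of the values by count (objective: alternative).
-- image_to_text['text'] (first-match association-list lookup, used by both programs)
def pvText (it : List (String × String)) : String := (PySem.Dict.mk it).getD "text" ""

-- ===== PORT A =====
def simple_summarization (image_to_text_list : List (List (List (String × String)))) : List (List (String × String)) :=
  image_to_text_list.foldl (fun best scene =>
    let d := scene.foldl (fun d it =>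
      let t := pvText it
      if d.contains t then d.insert t (d.getD t 0 + 1) else d.insert t (1 : Int))
      PySem.Dict.empty
    -- max(dict_for_scene.items(), key=operator.itemgetter(1))[0]; none = ValueError on an empty scene, excluded by Pre_
    match PySem.List.max? d.items (fun p => p.2) with
    | some kv =>
      -- the break-loop: append the first item whose text equals max_key (nothing if no match)
      match scene.find? (fun it => pvText it == kv.1) with
      | some it => best ++ [it]
      | none => best
    | none => best) []

-- ===== PORT B =====
def simple_summarization_alt (image_to_text_list : List (List (List (String × String)))) : List (List (String × String)) :=
  image_to_text_list.foldl (fun best scene =>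
    let d := scene.foldl (fun d it =>
      let t := pvText it
      let p := d.getD t ((0 : Int), it)
      d.insert t (p.1 + 1, p.2))
      (PySem.Dict.empty : PySem.Dict String (Int × List (String × String)))
    -- max(stats.values(), key=lambda v: v[0])[1]; none = ValueError on an empty scene, excluded by Pre_
    match PySem.List.max? d.values (fun v => v.1) with
    | some v => best ++ [v.2]
    | none => best) []

-- ===== PRECONDITION & SPEC =====
-- Pre_ excludes exactly the inputs where Python A raises: an empty scene (ValueError from max)
-- or an item without the key 'text' (KeyError).
def Pre_simple_summarization (image_to_text_list : List (List (List (String × String)))) : Prop :=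
  (image_to_text_list.all (fun scene =>
    !scene.isEmpty && scene.all (fun it => ((PySem.Dict.mk it).get? "text").isSome))) = true
instance (image_to_text_list : List (List (List (String × String)))) : Decidable (Pre_simple_summarization image_to_text_list) := by unfold Pre_simple_summarization; infer_instance
def pvWitness_simple_summarization : (List (List (List (String × String)))) := [[[("text", "a")], [("text", "a")], [("text", "b")]]]

def Spec_simple_summarization (image_to_text_list : List (List (List (String × String)))) (out : List (List (String × String))) : Prop := out = simple_summarization_alt image_to_text_list
instance (image_to_text_list : List (List (List (String × String)))) (out : List (List (String × String))) : Decidable (Spec_simple_summarization image_to_text_list out) := by unfold Spec_simple_summarization; infer_instance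

-- ===== CLAIM (what is proved, stated in full; the proofs are below) =====
def Claim_equal_simple_summarization : Prop := ∀ (image_to_text_list : List (List (List (String × String)))), Dom_simple_summarization image_to_text_list → Pre_simple_summarization image_to_text_list → Spec_simple_summarization image_to_text_list (simple_summarization image_to_text_list)

-- ===== LEMMAS AND PROOFS =====

-- max? of a mapped list, with a key reading through the map: max? picks the same position.
lemma max?_map_aux {α β κ : Type} [LT κ] [DecidableLT κ] (f : α → β) (g : β → κ)
    (l : List α) (acc : Option α) :
    List.foldl (fun acc x => match acc with
        | none => some x
        | some m => if g m < g x then some x else some m) (Option.map f acc) (l.map f)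
    = Option.map f (List.foldl (fun acc x => match acc with
        | none => some x
        | some m => if g (f m) < g (f x) then some x else some m) acc l) := by
  induction l generalizing acc with
  | nil => simp
  | cons x t ih =>
    simp only [List.map_cons, List.foldl_cons]
    cases acc with
    | none => simpa using ih (some x)
    | some m =>
      simp only [Option.map_some]
      split_ifs
      · simpa using ih (some x)
      · simpa using ih (some m)

lemma max?_map {α β κ : Type} [LT κ] [DecidableLT κ] (f : α → β) (g : β → κ) (l : List α) :
    PySem.List.max? (l.map f) g = Option.map f (PySem.List.max? l (fun a => g (f a))) := by
  simpa [PySem.List.max?] using max?_map_aux f g l none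

-- A's counting loop is Counter(texts of the scene)
lemma countsA_eq_counter (scene : List (List (String × String))) :
    scene.foldl (fun d it =>
      let t := pvText it
      if d.contains t then d.insert t (d.getD t 0 + 1) else d.insert t (1 : Int))
      PySem.Dict.empty
    = PySem.Dict.counter (scene.map pvText) := by
  rw [← PySem.Dict.foldl_insert_getD_add_one_eq_counter, List.foldl_map]
  congr 1
  funext d it
  by_cases h : d.contains (pvText it)
  · simp [h]
  · simp only [h, Bool.false_eq_true, if_false,
      PySem.Dict.getD_of_not_contains d 0 (by simpa using h), zero_add]

def firstWith (scene : List (List (String × String))) (k : String) : List (String × String) :=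
  (scene.find? (fun it => pvText it == k)).getD []

lemma find?_isSome_of_mem_texts {s : List (List (String × String))} {k : String}
    (h : k ∈ s.map pvText) : (s.find? (fun it => pvText it == k)).isSome := by
  obtain ⟨it, hit, hk⟩ := List.mem_map.1 h
  rw [List.find?_isSome]
  exact ⟨it, hit, by simp [hk]⟩

-- closed form of B's per-scene dict: per text, its multiplicity and the first item carrying it
lemma dB_items (scene : List (List (String × String))) :
    (scene.foldl (fun d it =>
      let t := pvText it
      let p := d.getD t ((0 : Int), it)
      d.insert t (p.1 + 1, p.2))
      (PySem.Dict.empty : PySem.Dict String (Int × List (String × String)))).items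
    = (PySem.Set.ofList (scene.map pvText)).map
        (fun k => (k, (((scene.map pvText).count k : Int), firstWith scene k))) := by
  induction scene using List.reverseRecOn with
  | nil => rfl
  | append_singleton s it ih =>
    rw [List.foldl_append, List.foldl_cons, List.foldl_nil]
    set D := s.foldl (fun d it =>
      let t := pvText it
      let p := d.getD t ((0 : Int), it)
      d.insert t (p.1 + 1, p.2))
      (PySem.Dict.empty : PySem.Dict String (Int × List (String × String))) with hD
    have hkeys : D.keys = PySem.Set.ofList (s.map pvText) := by
      rw [hD]
      exact PySem.Dict.keys_foldl_insert_key s pvText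
        (fun d it => ((d.getD (pvText it) ((0 : Int), it)).1 + 1, (d.getD (pvText it) ((0 : Int), it)).2))
        PySem.Dict.empty
    have hnd : D.keys.Nodup := by
      rw [hkeys]; exact PySem.Set.nodup_ofList _
    have hmapappend : (s ++ [it]).map pvText = s.map pvText ++ [pvText it] := by simp
    have hsetappend : PySem.Set.ofList ((s ++ [it]).map pvText)
        = PySem.Set.add (PySem.Set.ofList (s.map pvText)) (pvText it) := by
      rw [hmapappend]; simp [PySem.Set.ofList, List.foldl_append]
    by_cases hmem : pvText it ∈ s.map pvText
    · -- key already present: overwrite in place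
      have hcont : D.contains (pvText it) = true := by
        rw [PySem.Dict.contains_eq_decide_mem_keys, hkeys]
        simp [PySem.Set.mem_ofList, hmem]
      have hget : D.getD (pvText it) ((0 : Int), it)
          = (((s.map pvText).count (pvText it) : Int), firstWith s (pvText it)) := by
        exact PySem.Dict.getD_of_mem_items D
          (by rw [ih]; exact List.mem_map.2 ⟨pvText it, (PySem.Set.mem_ofList _ _).2 hmem, rfl⟩)
          hnd _
      simp only [hget]
      rw [PySem.Dict.items_insert_of_contains _ _ hcont, ih, List.map_map, hsetappend]
      have hadd : PySem.Set.add (PySem.Set.ofList (s.map pvText)) (pvText it)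
          = PySem.Set.ofList (s.map pvText) := by
        simp [PySem.Set.add, (PySem.Set.mem_ofList _ _).2 hmem]
      rw [hadd]
      apply List.map_congr_left
      intro k hk
      have hkts : k ∈ s.map pvText := (PySem.Set.mem_ofList _ _).1 hk
      have hfw : firstWith (s ++ [it]) k = firstWith s k := by
        unfold firstWith
        rw [List.find?_append, Option.or_of_isSome (find?_isSome_of_mem_texts hkts)]
      by_cases hkt : k = pvText it
      · rw [hkt] at hfw hkts
        simp only [Function.comp_apply, hkt, beq_self_eq_true, if_true]
        rw [hfw, hmapappend, List.count_append]
        simp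
      · simp only [Function.comp_apply, hfw, hmapappend]
        rw [List.count_append]
        simp [hkt, Ne.symm hkt]
    · -- fresh key: appended at the end
      have hcont : D.contains (pvText it) = false := by
        rw [PySem.Dict.contains_eq_decide_mem_keys, hkeys]
        simp [PySem.Set.mem_ofList, hmem]
      have hget : D.getD (pvText it) ((0 : Int), it) = ((0 : Int), it) :=
        PySem.Dict.getD_of_not_contains _ _ hcont
      simp only [hget]
      rw [PySem.Dict.items_insert_of_not_contains _ _ hcont, ih, hsetappend]
      have hadd : PySem.Set.add (PySem.Set.ofList (s.map pvText)) (pvText it)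
          = PySem.Set.ofList (s.map pvText) ++ [pvText it] := by
        simp [PySem.Set.add, (PySem.Set.mem_ofList (s.map pvText) (pvText it)), hmem]
      rw [hadd, List.map_append]
      congr 1
      · apply List.map_congr_left
        intro k hk
        have hkts : k ∈ s.map pvText := (PySem.Set.mem_ofList _ _).1 hk
        have hkt : k ≠ pvText it := fun h => hmem (h ▸ hkts)
        have hfw : firstWith (s ++ [it]) k = firstWith s k := by
          unfold firstWith
          rw [List.find?_append, Option.or_of_isSome (find?_isSome_of_mem_texts hkts)]
        simp only [hfw, hmapappend]
        rw [List.count_append]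
        simp [Ne.symm hkt]
      · have hzero : List.count (pvText it) (List.map pvText s) = 0 := by
          rw [List.count_eq_zero]
          simpa using hmem
        have hfw : firstWith (s ++ [it]) (pvText it) = it := by
          unfold firstWith
          rw [List.find?_append, List.find?_eq_none.2 (by
            intro x hx hbeq
            exact hmem (by rw [← eq_of_beq hbeq]; exact List.mem_map_of_mem hx))]
          simp
        simp [hfw, zero_add]
        exact hzero

-- proof-side names for the two per-scene step functions (same code as in the ports)
def stepA (best : List (List (String × String))) (scene : List (List (String × String))) : List (List (String × String)) :=
  let d := scene.foldl (fun d it =>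
    let t := pvText it
    if d.contains t then d.insert t (d.getD t 0 + 1) else d.insert t (1 : Int))
    PySem.Dict.empty
  match PySem.List.max? d.items (fun p => p.2) with
  | some kv =>
    match scene.find? (fun it => pvText it == kv.1) with
    | some it => best ++ [it]
    | none => best
  | none => best

def stepB (best : List (List (String × String))) (scene : List (List (String × String))) : List (List (String × String)) :=
  let d := scene.foldl (fun d it =>
    let t := pvText it
    let p := d.getD t ((0 : Int), it)
    d.insert t (p.1 + 1, p.2))
    (PySem.Dict.empty : PySem.Dict String (Int × List (String × String)))
  match PySem.List.max? d.values (fun v => v.1) with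
  | some v => best ++ [v.2]
  | none => best

-- one scene step of A equals one scene step of B
lemma stepA_eq_stepB (best scene) : stepA best scene = stepB best scene := by
  unfold stepA stepB
  simp only [countsA_eq_counter, PySem.Dict.items_counter, PySem.Dict.values, dB_items,
    List.map_map]
  rw [max?_map (fun k => (k, ((scene.map pvText).count k : Int))) (fun p => p.2)]
  rw [show ((fun (x : String × (Int × List (String × String))) => x.2) ∘
      (fun k => (k, (((scene.map pvText).count k : Int), firstWith scene k))))
    = fun k => (((scene.map pvText).count k : Int), firstWith scene k) from rfl]
  rw [max?_map (fun k => (((scene.map pvText).count k : Int), firstWith scene k)) (fun v => v.1)]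
  cases h : PySem.List.max? (PySem.Set.ofList (scene.map pvText))
      (fun k => ((scene.map pvText).count k : Int)) with
  | none => simp
  | some k =>
    have hk : k ∈ scene.map pvText := (PySem.Set.mem_ofList _ _).1 (PySem.List.max?_mem h)
    obtain ⟨w, hw⟩ := Option.isSome_iff_exists.1 (find?_isSome_of_mem_texts hk)
    simp [hw, firstWith]

lemma foldl_stepA_eq (l : List (List (List (String × String)))) (best : List (List (String × String))) :
    l.foldl stepA best = l.foldl stepB best := by
  induction l generalizing best with
  | nil => rfl
  | cons x t ih => simp only [List.foldl_cons, stepA_eq_stepB]; exact ih _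

-- ===== VERDICT (by name: the statement is the Claim_ definition above) =====
theorem simple_summarization_spec : Claim_equal_simple_summarization := by
  intro l _ _
  show simple_summarization l = simple_summarization_alt l
  exact foldl_stepA_eq l []
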